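-- pv_equiv track=rewrite | github.com/seyyedAlirezaGhazanfari/AI_HW4 | main.py | create_undirected_graph
-- ===== SOURCE A (Python) =====
-- def create_undirected_graph(graph: dict):
--     undirected_graph = dict()
--     for node in graph.keys():
--         temp_list = graph[node]
--         for item in graph.keys():
--             if node in graph[item] and item not in graph[node]:
--                 temp_list.append(item)
--         undirected_graph[node] = temp_list
--     return undirected_graph
-- ===== SOURCE B (Python) =====
-- def create_undirected_graph(graph: dict):
--     to_add = {node: [] for node in graph}
--     for item in graph:
--         seen = set()
--         for nbr in graph[item]:
--             if nbr in seen: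
--                 continue
--             seen.add(nbr)
--             if nbr in to_add and item not in graph[nbr]:
--                 to_add[nbr].append(item)
--     for node in graph:
--         graph[node].extend(to_add[node])
--     return dict(graph)
-- ===== Notes on version B (the rewrite author's own statement) =====
-- stated objective: faster
-- what changed: A rescans every key's adjacency list for every node (V*V membership scans); B builds a reverse-adjacency table in one pass over all edges (with a per-key seen set to count duplicate neighbours once) and then appends each key's collected reverse edges in a second pass.
import Mathlib
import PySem

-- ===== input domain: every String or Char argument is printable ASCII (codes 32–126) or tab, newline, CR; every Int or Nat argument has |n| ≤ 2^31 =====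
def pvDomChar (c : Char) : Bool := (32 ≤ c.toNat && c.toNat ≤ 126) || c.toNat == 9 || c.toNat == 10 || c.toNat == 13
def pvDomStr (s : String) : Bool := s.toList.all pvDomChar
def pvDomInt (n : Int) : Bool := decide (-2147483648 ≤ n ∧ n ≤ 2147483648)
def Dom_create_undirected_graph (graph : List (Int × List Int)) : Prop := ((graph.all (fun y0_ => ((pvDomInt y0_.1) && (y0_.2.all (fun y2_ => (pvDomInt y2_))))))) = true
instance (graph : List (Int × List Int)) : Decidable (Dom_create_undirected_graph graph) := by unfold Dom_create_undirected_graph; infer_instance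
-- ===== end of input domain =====

-- B replaces A's V×V rescanning with one reverse-index pass plus one fill pass (objective: faster).
-- Both Pythons mutate the input dict's lists in place identically; the equivalence proved here is about the return value.

-- ===== PORT A =====
-- inner loop body: 'if node in graph[item] and item not in graph[node]: temp_list.append(item)'
def aInner (node : Int) (d : PySem.Dict Int (List Int)) (item : Int) : PySem.Dict Int (List Int) :=
  if (d.getD item []).contains node && !((d.getD node []).contains item)
  then d.insert node ((d.getD node []) ++ [item]) else d

-- outer loop body over 'node'; state = (mutable graph, undirected_graph being built)
def aOuter (ks : List Int) (st : PySem.Dict Int (List Int) × PySem.Dict Int (List Int)) (node : Int) :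
    PySem.Dict Int (List Int) × PySem.Dict Int (List Int) :=
  let d' := ks.foldl (aInner node) st.1
  (d', st.2.insert node (d'.getD node []))

def create_undirected_graph (graph : List (Int × List Int)) : List (Int × List Int) :=
  let d0 := PySem.Dict.ofList graph
  let ks := d0.keys
  ((ks.foldl (aOuter ks) (d0, PySem.Dict.empty)).2).items

-- ===== PORT B =====
-- body of 'for nbr in graph[item]' with the per-item 'seen' set; state = (seen, to_add)
def bInner (d0 : PySem.Dict Int (List Int)) (item : Int) (st : PySem.Set Int × PySem.Dict Int (List Int)) (nbr : Int) :
    PySem.Set Int × PySem.Dict Int (List Int) :=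
  if PySem.Set.contains st.1 nbr then st
  else
    let seen := PySem.Set.add st.1 nbr
    if st.2.contains nbr && !((d0.getD nbr []).contains item)
    then (seen, st.2.insert nbr ((st.2.getD nbr []) ++ [item]))
    else (seen, st.2)

-- one iteration of 'for item in graph' in the reverse-index pass
def bCollect (d0 : PySem.Dict Int (List Int)) (t : PySem.Dict Int (List Int)) (item : Int) : PySem.Dict Int (List Int) :=
  ((d0.getD item []).foldl (bInner d0 item) (PySem.Set.empty, t)).2

def create_undirected_graph_alt (graph : List (Int × List Int)) : List (Int × List Int) :=
  let d0 := PySem.Dict.ofList graph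
  let ks := d0.keys
  let toAdd := ks.foldl (bCollect d0) (ks.foldl (fun t n => t.insert n ([] : List Int)) PySem.Dict.empty)
  ((ks.foldl (fun d node => d.insert node ((d.getD node []) ++ (toAdd.getD node []))) d0)).items

-- ===== PRECONDITION & SPEC =====
def Spec_create_undirected_graph (graph : List (Int × List Int)) (out : List (Int × List Int)) : Prop := out = create_undirected_graph_alt graph
instance (graph : List (Int × List Int)) (out : List (Int × List Int)) : Decidable (Spec_create_undirected_graph graph out) := by unfold Spec_create_undirected_graph; infer_instance

-- ===== CLAIM (what is proved, stated in full; the proofs are below) =====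
def Claim_equal_create_undirected_graph : Prop := ∀ (graph : List (Int × List Int)), Dom_create_undirected_graph graph → Spec_create_undirected_graph graph (create_undirected_graph graph)

-- ===== LEMMAS AND PROOFS =====

-- the original adjacency list of k in the dict d0
def gD (d0 : PySem.Dict Int (List Int)) (k : Int) : List Int := d0.getD k []

-- the append condition both programs test for candidate reverse edge 'it' into k's list
def predD (d0 : PySem.Dict Int (List Int)) (k it : Int) : Bool :=
  (gD d0 it).contains k && !((gD d0 k).contains it)

-- the reverse edges appended to k's list, in key order
def addD (d0 : PySem.Dict Int (List Int)) (k : Int) : List Int :=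
  d0.keys.filter (predD d0 k)

lemma mem_addD (d0 : PySem.Dict Int (List Int)) (k it : Int) :
    it ∈ addD d0 k ↔ it ∈ d0.keys ∧ k ∈ gD d0 it ∧ it ∉ gD d0 k := by
  simp [addD, predD, List.mem_filter]

lemma predD_self_self (d0 : PySem.Dict Int (List Int)) (node : Int) :
    predD d0 node node = false := by
  unfold predD
  simp


-- A's inner loop: appending equals filtering by predD
lemma innerA_go (d0 : PySem.Dict Int (List Int)) (node : Int) :
    ∀ (l ipre : List Int) (d : PySem.Dict Int (List Int)),
      (ipre ++ l).Nodup →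
      (∀ k, k ≠ node → d.getD k [] = gD d0 k ∨ d.getD k [] = gD d0 k ++ addD d0 k) →
      d.getD node [] = gD d0 node ++ ipre.filter (predD d0 node) →
      (∀ k, k ≠ node → (l.foldl (aInner node) d).getD k [] = d.getD k []) ∧
      (l.foldl (aInner node) d).getD node [] = gD d0 node ++ (ipre ++ l).filter (predD d0 node) := by
  intro l
  induction l with
  | nil => intro ipre d _ _ Hn; exact ⟨fun k _ => rfl, by simpa using Hn⟩
  | cons item l ih =>
    intro ipre d hnd Ho Hn
    rcases List.nodup_append.mp hnd with ⟨h1, h2, hdisj⟩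
    have hnd' : (ipre ++ [item] ++ l).Nodup := by
      rw [List.append_assoc]; exact hnd
    have hassoc : (ipre ++ [item] ++ l).filter (predD d0 node)
        = (ipre ++ item :: l).filter (predD d0 node) := by
      rw [List.append_assoc]; rfl
    have hitem_nipre : item ∉ ipre := fun h => hdisj item h item List.mem_cons_self rfl
    by_cases hin : item = node
    · subst hin
      have hstep : aInner item d item = d := by
        unfold aInner
        simp
      have hfip : (ipre ++ [item]).filter (predD d0 item) = ipre.filter (predD d0 item) := by
        rw [List.filter_append]; simp [predD_self_self]
      have := ih (ipre ++ [item]) d hnd' Ho (by rw [Hn, hfip])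
      simpa [List.foldl_cons, hstep, hassoc] using this
    · -- item ≠ node
      have hmemnode : ∀ y, y ∈ d.getD node [] ↔ y ∈ gD d0 node ∨ (y ∈ ipre ∧ predD d0 node y = true) := by
        intro y; rw [Hn]; simp [List.mem_filter]
      have hcond : ((d.getD item []).contains node && !((d.getD node []).contains item))
          = predD d0 node item := by
        apply Bool.coe_iff_coe.mp
        have hrhs : (predD d0 node item = true) ↔ (node ∈ gD d0 item ∧ item ∉ gD d0 node) := by
          simp [predD]
        have hlhs : (((d.getD item []).contains node && !((d.getD node []).contains item)) = true)
            ↔ (node ∈ d.getD item [] ∧ item ∉ d.getD node []) := by simp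
        rw [hrhs, hlhs]
        have hnotn : item ∉ d.getD node [] ↔ item ∉ gD d0 node := by
          rw [hmemnode item]
          constructor
          · intro h hg; exact h (Or.inl hg)
          · intro h hmem
            rcases hmem with hg | ⟨hip, _⟩
            · exact h hg
            · exact hitem_nipre hip
        rw [hnotn]
        rcases Ho item hin with h | h
        · rw [h]
        · rw [h]
          constructor
          · rintro ⟨hmem, hng⟩
            rcases List.mem_append.mp hmem with hg | hadd
            · exact ⟨hg, hng⟩
            · exact absurd ((mem_addD d0 item node).mp hadd).2.1 hng
          · rintro ⟨hg, hng⟩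
            exact ⟨List.mem_append.mpr (Or.inl hg), hng⟩
      simp only [List.foldl_cons, aInner, hcond]
      by_cases hp : predD d0 node item = true
      · simp only [hp, if_true]
        have Ho' : ∀ k, k ≠ node → (d.insert node (d.getD node [] ++ [item])).getD k []
            = gD d0 k ∨ (d.insert node (d.getD node [] ++ [item])).getD k [] = gD d0 k ++ addD d0 k := by
          intro k hk
          rw [PySem.Dict.getD_insert_of_ne]
          · exact Ho k hk
          · exact hk
        have Hn' : (d.insert node (d.getD node [] ++ [item])).getD node []
            = gD d0 node ++ (ipre ++ [item]).filter (predD d0 node) := by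
          rw [PySem.Dict.getD_insert_self, Hn, List.filter_append, List.append_assoc]
          simp [hp]
        have := ih (ipre ++ [item]) _ hnd' Ho' Hn'
        rcases this with ⟨c1, c2⟩
        constructor
        · intro k hk
          rw [c1 k hk, PySem.Dict.getD_insert_of_ne]
          exact hk
        · rw [c2, hassoc]
      · rw [if_neg (by simp [eq_false_of_ne_true hp])]
        have Hn' : d.getD node [] = gD d0 node ++ (ipre ++ [item]).filter (predD d0 node) := by
          rw [Hn, List.filter_append]
          simp [eq_false_of_ne_true hp]
        have := ih (ipre ++ [item]) d hnd' Ho Hn'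
        rcases this with ⟨c1, c2⟩
        exact ⟨c1, by rw [c2, hassoc]⟩

-- A's outer loop builds undirected_graph key by key
lemma outerA_go (d0 : PySem.Dict Int (List Int)) :
    ∀ (l pre : List Int) (d und : PySem.Dict Int (List Int)),
      pre ++ l = d0.keys →
      d0.keys.Nodup →
      (∀ k, d.getD k [] = gD d0 k ++ (if k ∈ pre then addD d0 k else [])) →
      und.items = pre.map (fun k => (k, gD d0 k ++ addD d0 k)) →
      ((l.foldl (aOuter d0.keys) (d, und)).2).items
        = d0.keys.map (fun k => (k, gD d0 k ++ addD d0 k)) := by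
  intro l
  induction l with
  | nil =>
    intro pre d und hks _ _ Hund
    rw [List.append_nil] at hks
    subst hks
    simpa using Hund
  | cons node l ih =>
    intro pre d und hks hnd Hd Hund
    have hnodepre : node ∉ pre := by
      have h : (pre ++ node :: l).Nodup := by rw [hks]; exact hnd
      rcases List.nodup_append.mp h with ⟨_, _, hdisj⟩
      exact fun hm => hdisj node hm node List.mem_cons_self rfl
    have hksnd : d0.keys.Nodup := hnd
    have hinner := innerA_go d0 node d0.keys [] d
      (by simpa using hksnd)
      (by
        intro k hk
        rcases em (k ∈ pre) with h | h
        · right; rw [Hd k, if_pos h]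
        · left; rw [Hd k, if_neg h]; simp)
      (by rw [Hd node, if_neg hnodepre]; simp)
    rcases hinner with ⟨hother, hnode⟩
    have hnodeval : (List.foldl (aInner node) d d0.keys).getD node [] = gD d0 node ++ addD d0 node := by
      rw [hnode]; rfl
    have hundkeys : und.contains node = false := by
      rw [PySem.Dict.contains_eq_decide_mem_keys]
      simp only [PySem.Dict.keys, Hund, List.map_map]
      simp [hnodepre, Function.comp]
    simp only [List.foldl_cons, aOuter]
    apply ih (pre ++ [node])
    · rw [List.append_assoc]; exact hks
    · exact hnd
    · intro k
      by_cases hkn : k = node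
      · subst hkn
        rw [hnodeval, if_pos (by simp)]
      · rw [hother k hkn, Hd k]
        have : (k ∈ pre ++ [node]) ↔ k ∈ pre := by simp [hkn]
        rw [if_congr this rfl rfl]
    · rw [PySem.Dict.items_insert_of_not_contains _ _ hundkeys, Hund, hnodeval]
      simp

-- A computes: each key's list is its original list plus the reverse edges, in key order
lemma A_char (graph : List (Int × List Int)) :
    create_undirected_graph graph
      = (PySem.Dict.ofList graph).keys.map
          (fun k => (k, gD (PySem.Dict.ofList graph) k ++ addD (PySem.Dict.ofList graph) k)) := by
  unfold create_undirected_graph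
  apply outerA_go (PySem.Dict.ofList graph) (PySem.Dict.ofList graph).keys []
  · rfl
  · exact PySem.Dict.nodup_keys_ofList graph
  · intro k; simp [gD]
  · rfl

-- B: every value of {node: [] for node in keys} is []
lemma toAdd0_getD :
    ∀ (l : List Int) (t : PySem.Dict Int (List Int)), (∀ k, t.getD k [] = ([] : List Int)) →
      ∀ k, (l.foldl (fun t n => t.insert n ([] : List Int)) t).getD k [] = [] := by
  intro l
  induction l with
  | nil => intro t ht k; exact ht k
  | cons n l ih =>
    intro t ht k
    simp only [List.foldl_cons]
    apply ih
    intro k'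
    rw [PySem.Dict.getD_insert]
    split <;> simp [ht]

lemma toAdd0_keys (ks : List Int) (hnd : ks.Nodup) :
    (ks.foldl (fun t n => t.insert n ([] : List Int)) PySem.Dict.empty).keys = ks := by
  rw [PySem.Dict.keys_foldl_insert]
  rw [PySem.Dict.keys_empty, PySem.Set.update_nil_left]
  exact PySem.Set.ofList_eq_self_of_nodup _ hnd

-- B's inner loop over graph[item] with its 'seen' set: appends item to to_add[k] at most once
lemma innerB_go (d0 : PySem.Dict Int (List Int)) (item : Int) :
    ∀ (ns : List Int) (s : PySem.Set Int) (t : PySem.Dict Int (List Int)),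
      (∀ k, ((ns.foldl (bInner d0 item) (s, t)).2).contains k = t.contains k) ∧
      (∀ k, ((ns.foldl (bInner d0 item) (s, t)).2).getD k []
        = t.getD k [] ++ (if k ∈ ns ∧ k ∉ s ∧ t.contains k = true ∧ item ∉ d0.getD k []
            then [item] else [])) := by
  intro ns
  induction ns with
  | nil => intro s t; exact ⟨fun k => rfl, fun k => by simp⟩
  | cons nbr ns ih =>
    intro s t
    simp only [List.foldl_cons]
    by_cases hs : nbr ∈ s
    · have hstep : bInner d0 item (s, t) nbr = (s, t) := by
        unfold bInner
        rw [if_pos ((PySem.Set.contains_iff s nbr).mpr hs)]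
      rw [hstep]
      refine ⟨(ih s t).1, fun k => ?_⟩
      rw [(ih s t).2 k]
      congr 1
      refine if_congr ?_ rfl rfl
      constructor
      · rintro ⟨hk, hks, h3⟩
        exact ⟨List.mem_cons_of_mem _ hk, hks, h3⟩
      · rintro ⟨hk, hks, h3⟩
        rcases List.mem_cons.mp hk with h | h
        · exact absurd (h ▸ hs) hks
        · exact ⟨h, hks, h3⟩
    · have hsc : ¬ (PySem.Set.contains s nbr = true) := by
        rw [PySem.Set.contains_iff]; exact hs
      have hseen : PySem.Set.add s nbr = s ++ [nbr] := PySem.Set.add_of_not_mem hs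
      by_cases hc : (t.contains nbr && !((d0.getD nbr []).contains item)) = true
      · have hstep : bInner d0 item (s, t) nbr
            = (s ++ [nbr], t.insert nbr (t.getD nbr [] ++ [item])) := by
          unfold bInner
          rw [if_neg hsc]
          simp only [hseen]
          rw [if_pos hc]
        simp only [Bool.and_eq_true, Bool.not_eq_true'] at hc
        have hitem : item ∉ d0.getD nbr [] := by simpa using hc.2
        rw [hstep]
        have hcont : ∀ k, (t.insert nbr (t.getD nbr [] ++ [item])).contains k = t.contains k := by
          intro k
          rw [PySem.Dict.contains_insert]
          by_cases hk : k = nbr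
          · subst hk; simp [hc.1]
          · simp [hk]
        constructor
        · intro k
          rw [(ih _ _).1 k, hcont k]
        · intro k
          rw [(ih _ _).2 k]
          by_cases hk : k = nbr
          · subst hk
            rw [PySem.Dict.getD_insert_self]
            rw [if_neg (by simp), if_pos ⟨List.mem_cons_self, hs, hc.1, hitem⟩]
            simp
          · rw [PySem.Dict.getD_insert_of_ne]
            · congr 1
              refine if_congr ?_ rfl rfl
              constructor
              · rintro ⟨h1, h2, h3, h4⟩
                exact ⟨List.mem_cons_of_mem _ h1, fun hm => h2 (by simp [hm]),
                  by rw [← hcont k]; exact h3, h4⟩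
              · rintro ⟨h1, h2, h3, h4⟩
                refine ⟨?_, by simp [hk, h2], by rw [hcont k]; exact h3, h4⟩
                rcases List.mem_cons.mp h1 with h | h
                · exact absurd h hk
                · exact h
            · exact hk
      · have hstep : bInner d0 item (s, t) nbr = (s ++ [nbr], t) := by
          unfold bInner
          rw [if_neg hsc]
          simp only [hseen]
          rw [if_neg hc]
        rw [hstep]
        refine ⟨(ih _ _).1, fun k => ?_⟩
        rw [(ih _ _).2 k]
        congr 1
        refine if_congr ?_ rfl rfl
        by_cases hk : k = nbr
        · subst hk
          constructor
          · rintro ⟨_, hks, _⟩; exact absurd (by simp) hks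
          · rintro ⟨_, _, hct, hni⟩
            exact absurd (by simp [hct, hni]) hc
        · constructor
          · rintro ⟨h1, h2, h3⟩
            exact ⟨List.mem_cons_of_mem _ h1, fun hm => h2 (by simp [hm]), h3⟩
          · rintro ⟨h1, h2, h3⟩
            refine ⟨?_, by simp [hk, h2], h3⟩
            rcases List.mem_cons.mp h1 with h | h
            · exact absurd h hk
            · exact h

-- B's reverse-index pass equals a filter per key, in key order
lemma collect_go (d0 : PySem.Dict Int (List Int)) :
    ∀ (l : List Int) (t : PySem.Dict Int (List Int)),
      (∀ k, (l.foldl (bCollect d0) t).contains k = t.contains k) ∧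
      (∀ k, (l.foldl (bCollect d0) t).getD k []
        = t.getD k [] ++ (if t.contains k = true
            then l.filter (fun it => (d0.getD it []).contains k && !((d0.getD k []).contains it))
            else [])) := by
  intro l
  induction l with
  | nil => intro t; exact ⟨fun k => rfl, fun k => by cases h : t.contains k <;> simp⟩
  | cons item l ih =>
    intro t
    simp only [List.foldl_cons]
    have hI := innerB_go d0 item (d0.getD item []) PySem.Set.empty t
    have hstepc : ∀ k, (bCollect d0 t item).contains k = t.contains k := fun k => hI.1 k
    have hstepv : ∀ k, (bCollect d0 t item).getD k []
        = t.getD k [] ++ (if k ∈ d0.getD item [] ∧ k ∉ (PySem.Set.empty : PySem.Set Int)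
              ∧ t.contains k = true ∧ item ∉ d0.getD k []
            then [item] else []) := fun k => hI.2 k
    refine ⟨fun k => by rw [(ih _).1 k, hstepc k], fun k => ?_⟩
    rw [(ih _).2 k, hstepv k, hstepc k]
    by_cases ht : t.contains k = true
    · rw [if_pos ht, if_pos ht, List.filter_cons]
      by_cases hp : ((d0.getD item []).contains k && !((d0.getD k []).contains item)) = true
      · have hcond : k ∈ d0.getD item [] ∧ k ∉ (PySem.Set.empty : PySem.Set Int)
            ∧ t.contains k = true ∧ item ∉ d0.getD k [] := by
          simp only [Bool.and_eq_true, Bool.not_eq_true'] at hp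
          exact ⟨List.contains_iff_mem.mp hp.1, by simp [PySem.Set.empty], ht, by simpa using hp.2⟩
        rw [if_pos hcond, if_pos hp]
        simp
      · have hcond : ¬ (k ∈ d0.getD item [] ∧ k ∉ (PySem.Set.empty : PySem.Set Int)
            ∧ t.contains k = true ∧ item ∉ d0.getD k []) := by
          rintro ⟨h1, _, _, h4⟩
          refine hp ?_
          simp only [Bool.and_eq_true, Bool.not_eq_true']
          exact ⟨List.contains_iff_mem.mpr h1, by simpa using h4⟩
        rw [if_neg hcond, if_neg (by simpa using hp)]
        simp
    · rw [if_neg ht, if_neg ht,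
        if_neg (by rintro ⟨_, _, h3, _⟩; exact ht h3)]
      simp

-- B's fill pass: each key gets its computed additions appended once
lemma fill_go (F : Int → List Int) :
    ∀ (l : List Int) (d : PySem.Dict Int (List Int)), l.Nodup →
      ∀ k, (l.foldl (fun d node => d.insert node ((d.getD node []) ++ F node)) d).getD k []
        = if k ∈ l then d.getD k [] ++ F k else d.getD k [] := by
  intro l
  induction l with
  | nil => intro d _ k; simp
  | cons n l ih =>
    intro d hnd k
    simp only [List.foldl_cons]
    rw [ih _ (List.Nodup.of_cons hnd) k]
    by_cases hk : k = n
    · subst hk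
      have hkl : k ∉ l := (List.nodup_cons.mp hnd).1
      rw [if_neg hkl, if_pos List.mem_cons_self, PySem.Dict.getD_insert_self]
    · rw [PySem.Dict.getD_insert_of_ne]
      · by_cases h2 : k ∈ l
        · rw [if_pos h2, if_pos (List.mem_cons_of_mem _ h2)]
        · rw [if_neg h2, if_neg (by simp [hk, h2])]
      · exact hk

lemma set_update_self (ks : List Int) : PySem.Set.update ks ks = ks := by
  rw [PySem.Set.update_eq_append_filter]
  have h : (PySem.Set.ofList ks).filter (fun y => !(PySem.Set.contains ks y)) = [] := by
    apply List.filter_eq_nil_iff.mpr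
    intro a ha
    have hm : a ∈ ks := (PySem.Set.mem_ofList ks a).mp ha
    simpa using hm
  rw [h, List.append_nil]

-- B computes the same table: original list plus reverse edges in key order
lemma B_char (graph : List (Int × List Int)) :
    create_undirected_graph_alt graph
      = (PySem.Dict.ofList graph).keys.map
          (fun k => (k, gD (PySem.Dict.ofList graph) k ++ addD (PySem.Dict.ofList graph) k)) := by
  have hnd : (PySem.Dict.ofList graph).keys.Nodup := PySem.Dict.nodup_keys_ofList graph
  unfold create_undirected_graph_alt
  set d0 := PySem.Dict.ofList graph with hd0
  set ks := d0.keys with hks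
  set toAdd0 := ks.foldl (fun t n => t.insert n ([] : List Int)) PySem.Dict.empty with htA0
  set toAdd := ks.foldl (bCollect d0) toAdd0 with htA
  have h0v : ∀ k, toAdd0.getD k [] = [] :=
    toAdd0_getD ks PySem.Dict.empty (fun k => by rw [PySem.Dict.getD_empty])
  have h0c : ∀ k, k ∈ ks → toAdd0.contains k = true := by
    intro k hk
    rw [PySem.Dict.contains_eq_decide_mem_keys, toAdd0_keys ks hnd]
    simpa using hk
  have htAddv : ∀ k, k ∈ ks → toAdd.getD k [] = addD d0 k := by
    intro k hk
    rw [htA, (collect_go d0 ks toAdd0).2 k, h0v k, h0c k hk, if_pos rfl]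
    rfl
  set final := ks.foldl (fun d node => d.insert node ((d.getD node []) ++ (toAdd.getD node []))) d0 with hfin
  have hkeys : final.keys = ks := by
    rw [hfin, PySem.Dict.keys_foldl_insert, ← hks, set_update_self ks]
  have hndf : final.keys.Nodup := by rw [hkeys]; exact hnd
  have hitems := PySem.Dict.items_eq_map_keys final hndf ([] : List Int)
  rw [hitems, hkeys]
  apply List.map_congr_left
  intro k hk
  rw [hfin, fill_go (fun node => toAdd.getD node []) ks d0 hnd k, if_pos hk, htAddv k hk]
  rfl

-- ===== VERDICT (by name: the statement is the Claim_ definition above) =====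
theorem create_undirected_graph_spec : Claim_equal_create_undirected_graph := by
  intro graph _
  unfold Spec_create_undirected_graph
  rw [A_char, B_char]
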